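-- pv_equiv track=rewrite | github.com/EdmundKorley/police-contracts-viz | dataUtility.py | dataByState
-- ===== SOURCE A (Python) =====
-- def dataByState(data):
--     new = {}
--     for item in data:
--         state = item['Contract City/State']
--         state = state.strip()
--         sign = new.get(state, None)
--         if sign is None:
--             new[state] = [item]
--         else:
--             sign.append(item)
--             new[state] = sign
--     return new
-- ===== SOURCE B (Python) =====
-- def dataByState(data):
--     states = [item['Contract City/State'].strip() for item in data]
--     return {k: [item for item in data if item['Contract City/State'].strip() == k]
--             for k in dict.fromkeys(states)}
-- ===== Notes on version B (the rewrite author's own statement) =====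
-- stated objective: alternative
-- what changed: Replaces the single accumulate-into-dict pass with a two-phase plan: first compute the ordered list of distinct stripped states (dict.fromkeys), then build each group by filtering the whole input for that state, instead of appending to per-key buckets while scanning.
import Mathlib
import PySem

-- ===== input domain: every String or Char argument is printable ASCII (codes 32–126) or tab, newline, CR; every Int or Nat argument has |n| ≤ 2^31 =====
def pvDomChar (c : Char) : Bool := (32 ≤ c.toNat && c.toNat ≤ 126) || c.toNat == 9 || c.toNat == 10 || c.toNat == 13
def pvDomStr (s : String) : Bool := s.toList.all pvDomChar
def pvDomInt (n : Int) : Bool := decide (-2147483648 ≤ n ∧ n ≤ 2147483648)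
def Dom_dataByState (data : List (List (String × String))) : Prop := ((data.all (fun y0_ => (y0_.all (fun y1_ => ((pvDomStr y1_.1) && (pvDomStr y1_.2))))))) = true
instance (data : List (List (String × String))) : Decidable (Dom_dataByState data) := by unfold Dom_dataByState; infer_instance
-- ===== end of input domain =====

-- B groups by first computing the ordered distinct stripped states, then filtering the input once per state
-- (alternative decomposition, not claimed faster); A and B are proved to return the same association list.


-- ===== PORT A =====
-- item['Contract City/State'].strip(); the .getD "" default is never used inside Pre_ (the key is present there)
def pvStateOf (item : List (String × String)) : String :=
  PySem.Str.strip (((PySem.Dict.mk item).get? "Contract City/State").getD "")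

def dataByState (data : List (List (String × String))) : List (String × List (List (String × String))) :=
  (data.foldl (fun new item =>
      let state := pvStateOf item
      match new.get? state with
      | none => new.insert state [item]
      | some sign => new.insert state (sign ++ [item]))
    PySem.Dict.empty).items

-- ===== PORT B =====
def dataByState_alt (data : List (List (String × String))) : List (String × List (List (String × String))) :=
  let states := data.map (fun item => pvStateOf item)
  (PySem.List.dedup states).map (fun k => (k, data.filter (fun item => pvStateOf item == k)))

-- ===== PRECONDITION & SPEC =====
-- Pre_ excludes exactly the inputs where some item lacks the 'Contract City/State' key, on which Python A raises KeyError.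
def Pre_dataByState (data : List (List (String × String))) : Prop :=
  ∀ item ∈ data, ((PySem.Dict.mk item).get? "Contract City/State").isSome = true
instance (data : List (List (String × String))) : Decidable (Pre_dataByState data) := by unfold Pre_dataByState; infer_instance

def pvWitness_dataByState : (List (List (String × String))) :=
  [[("Contract City/State", " CA "), ("Officer", "J")], [("Contract City/State", "CA")]]

def Spec_dataByState (data : List (List (String × String))) (out : List (String × List (List (String × String)))) : Prop := out = dataByState_alt data
instance (data : List (List (String × String))) (out : List (String × List (List (String × String)))) : Decidable (Spec_dataByState data out) := by unfold Spec_dataByState; infer_instance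

-- ===== CLAIM (what is proved, stated in full; the proofs are below) =====
def Claim_equal_dataByState : Prop := ∀ (data : List (List (String × String))), Dom_dataByState data → Pre_dataByState data → Spec_dataByState data (dataByState data)

-- ===== LEMMAS AND PROOFS =====

-- A's loop body is exactly d[state] = d.get(state, []) + [item], i.e. Dict.modify.
theorem pvStepEq (new : PySem.Dict String (List (List (String × String)))) (item : List (String × String)) :
    (match new.get? (pvStateOf item) with
      | none => new.insert (pvStateOf item) [item]
      | some sign => new.insert (pvStateOf item) (sign ++ [item]))
    = new.modify (pvStateOf item) [] (· ++ [item]) := by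
  cases h : new.get? (pvStateOf item) <;>
    simp [PySem.Dict.modify, PySem.Dict.getD_eq_get?_getD, h]

theorem pvFoldEq (data : List (List (String × String))) :
    data.foldl (fun new item =>
      match new.get? (pvStateOf item) with
      | none => new.insert (pvStateOf item) [item]
      | some sign => new.insert (pvStateOf item) (sign ++ [item])) PySem.Dict.empty
    = (data.map (fun item => (pvStateOf item, item))).foldl
        (fun d p => d.modify p.1 [] (· ++ [p.2])) PySem.Dict.empty := by
  have hstep : (fun (new : PySem.Dict String (List (List (String × String)))) item =>
      match new.get? (pvStateOf item) with
      | none => new.insert (pvStateOf item) [item]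
      | some sign => new.insert (pvStateOf item) (sign ++ [item]))
      = (fun new item => new.modify (pvStateOf item) [] (· ++ [item])) := by
    funext new item; exact pvStepEq new item
  rw [hstep, List.foldl_map]

theorem dataByState_spec : Claim_equal_dataByState := by
  intro data _ _
  unfold Spec_dataByState dataByState dataByState_alt
  rw [pvFoldEq]
  set l := data.map (fun item => (pvStateOf item, item)) with hl
  set d := l.foldl (fun d p => d.modify p.1 [] (· ++ [p.2])) PySem.Dict.empty with hd
  have hnd : d.keys.Nodup := by
    rw [hd]
    exact PySem.Dict.nodup_keys_foldl_modify_key l (·.1) [] (fun d p => (· ++ [p.2])) _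
      (by simp [PySem.Dict.keys_empty])
  rw [PySem.Dict.items_eq_map_keys d hnd []]
  have hkeys : d.keys = PySem.List.dedup (data.map (fun item => pvStateOf item)) := by
    rw [hd, PySem.Dict.keys_foldl_modify_key]
    simp [hl, PySem.Dict.keys_empty, List.map_map, PySem.List.dedup_eq_ofList]
    rfl
  rw [hkeys]
  apply List.map_congr_left
  intro k _
  have hget : d.getD k [] = (l.filter (fun p => p.1 == k)).map (·.2) := by
    rw [hd, PySem.Dict.getD_foldl_modify_append]
    simp [PySem.Dict.getD_empty]
  rw [hget, hl]
  simp [List.filter_map, List.map_map, Function.comp_def]
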